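-- pv_equiv track=rewrite | github.com/rmorriscpux/daily-coding-challenges | challenge_100.py | numStepsUnordered
-- ===== SOURCE A (Python) =====
-- from typing import List, Tuple
--
-- def numStepsUnordered(points: List[Tuple[int, int]]):
--     def rNumStepsUnordered(start_point, remaining_points, total_steps):
--         # End Case
--         if not remaining_points:
--             return total_steps
--
--         # In each iteration of the recursive function we need to determine the following:
--         # Minimum distance to any remaining point from the current start point.
--         # Which remaining points are the minimum distance away. (Collect the indices for these points in remaining_points in a list)
--         minimum_point_index_list = []
--         min_step_count = float("inf")
--         for index, end_point in enumerate(remaining_points):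
--             steps = max(abs(start_point[0]-end_point[0]), abs(start_point[1]-end_point[1]))
--             if steps < min_step_count:
--                 # We have a new minimum step count. Reset minimum_point_index_list with the new index, removing everything before.
--                 min_step_count = steps
--                 minimum_point_index_list = [index]
--             elif steps == min_step_count:
--                 minimum_point_index_list.append(index)
--
--         # Get the result for every point that is the minimum distance away in the current iteration, and return the minimum from that.
--         total_steps_map = map(lambda index: rNumStepsUnordered(remaining_points[index], remaining_points[:index]+remaining_points[index+1:], total_steps+min_step_count), minimum_point_index_list)
--         return min(list(total_steps_map))
--
--     return min(list(map(lambda index: rNumStepsUnordered(points[index], points[:index]+points[index+1:], 0), range(len(points)))))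
-- ===== SOURCE B (Python) =====
-- from typing import List, Tuple
--
-- def numStepsUnordered(points: List[Tuple[int, int]]):
--     # Bottom-up cost recursion: returns the remaining path cost directly instead of
--     # threading an accumulator, and picks the tie set by one min() plus a filter
--     # instead of a running-minimum index list.
--     def cost(p, rem):
--         if not rem:
--             return 0
--         d = min(max(abs(p[0] - q[0]), abs(p[1] - q[1])) for q in rem)
--         return d + min(cost(q, rem[:i] + rem[i + 1:])
--                        for i, q in enumerate(rem)
--                        if max(abs(p[0] - q[0]), abs(p[1] - q[1])) == d)
--     return min(cost(p, points[:i] + points[i + 1:]) for i, p in enumerate(points))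
-- ===== Notes on version B (the rewrite author's own statement) =====
-- stated objective: simpler
-- what changed: B replaces A's accumulator-threaded recursion and its two-phase running-minimum/tie-index-list loop by a bottom-up cost recursion: one min() over the distances plus a filtered generator over the tied points, with no index list and no threaded total.
-- outside the precondition, e.g. on numStepsUnordered([]): A raises ValueError, B raises ValueError
import Mathlib
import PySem

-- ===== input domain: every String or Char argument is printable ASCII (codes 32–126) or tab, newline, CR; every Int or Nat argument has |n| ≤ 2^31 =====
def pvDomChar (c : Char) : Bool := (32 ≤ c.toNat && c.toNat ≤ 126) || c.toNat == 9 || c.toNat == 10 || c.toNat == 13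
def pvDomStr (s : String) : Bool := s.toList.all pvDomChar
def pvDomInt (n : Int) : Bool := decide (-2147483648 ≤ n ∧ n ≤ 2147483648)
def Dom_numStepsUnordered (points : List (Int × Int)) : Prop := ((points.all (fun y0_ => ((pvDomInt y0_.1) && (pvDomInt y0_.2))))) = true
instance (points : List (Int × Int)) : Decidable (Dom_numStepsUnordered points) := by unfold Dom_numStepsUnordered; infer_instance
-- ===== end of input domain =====

-- B recomputes the same greedy tie-branching minimum bottom-up (cost returned, not an
-- accumulator threaded) with a single min() plus a filter instead of A's running-minimum
-- index list; objective: simpler.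

-- Shared transliterations of subexpressions both Pythons contain verbatim:
-- max(abs(p[0]-q[0]), abs(p[1]-q[1]))
def pvDist (p q : Int × Int) : Int := max |p.1 - q.1| |p.2 - q.2|
-- xs[:i] + xs[i+1:]
def pvRemove (xs : List (Int × Int)) (i : Int) : List (Int × Int) :=
  PySem.List.slice xs none (some i) ++ PySem.List.slice xs (some (i + 1)) none

-- ===== PORT A =====
-- one step of A's running-minimum loop body; state = (minimum_point_index_list, min_step_count),
-- with `none` playing float("inf")
def pvAStep (start : Int × Int) (st : List Int × Option Int) (iq : Int × (Int × Int)) :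
    List Int × Option Int :=
  let steps := pvDist start iq.2
  match st.2 with
  | none => ([iq.1], some steps)
  | some m =>
    if steps < m then ([iq.1], some steps)
    else if steps = m then (st.1 ++ [iq.1], some m)
    else st

-- rNumStepsUnordered; the Nat fuel (called with fuel > remaining.length) only makes the
-- recursion structural, it never fires on admitted inputs
def pvRNumA : Nat → (Int × Int) → List (Int × Int) → Int → Int
  | 0, _, _, total => total
  | fuel + 1, start, rem, total =>
    if rem = [] then total
    else
      let res := (PySem.List.enumerate rem).foldl (pvAStep start) ([], none)
      -- rem ≠ [] so res.2 is `some`; the default is never read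
      let m := res.2.getD 0
      let branches := res.1.map (fun i =>
        pvRNumA fuel (PySem.List.pyGetD rem i (0, 0)) (pvRemove rem i) (total + m))
      -- min(list(total_steps_map)); branches ≠ [] here, the default is never read
      (PySem.List.min? branches (fun v => v)).getD total

def numStepsUnordered (points : List (Int × Int)) : Int :=
  -- min(...) over range(len(points)); Python raises ValueError on points = [] (Pre_ excludes it)
  (PySem.List.min?
    ((PySem.List.pyRange 0 (PySem.List.len points) 1).map (fun i =>
      pvRNumA points.length (PySem.List.pyGetD points i (0, 0)) (pvRemove points i) 0))
    (fun v => v)).getD 0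

-- ===== PORT B =====
-- cost(p, rem) from Source B: bottom-up, min distance then filtered ties; same fuel guard
def pvCostB : Nat → (Int × Int) → List (Int × Int) → Int
  | 0, _, _ => 0
  | fuel + 1, p, rem =>
    if rem = [] then 0
    else
      let d := (PySem.List.min? (rem.map (pvDist p)) (fun v => v)).getD 0
      d + (PySem.List.min?
            (((PySem.List.enumerate rem).filter (fun iq => decide (pvDist p iq.2 = d))).map
              (fun iq => pvCostB fuel iq.2 (pvRemove rem iq.1)))
            (fun v => v)).getD 0

def numStepsUnordered_alt (points : List (Int × Int)) : Int :=
  -- min(...) over enumerate(points); raises ValueError on points = [] like A (Pre_ excludes it)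
  (PySem.List.min?
    ((PySem.List.enumerate points).map (fun ip =>
      pvCostB points.length ip.2 (pvRemove points ip.1)))
    (fun v => v)).getD 0

-- ===== PRECONDITION & SPEC =====
-- Pre_ excludes only points = [], where both Pythons raise ValueError (min of an empty sequence)
def Pre_numStepsUnordered (points : List (Int × Int)) : Prop := points ≠ []
instance (points : List (Int × Int)) : Decidable (Pre_numStepsUnordered points) := by
  unfold Pre_numStepsUnordered; infer_instance
def pvWitness_numStepsUnordered : (List (Int × Int)) := [(0, 0), (2, 3), (-1, 1)]

def Spec_numStepsUnordered (points : List (Int × Int)) (out : Int) : Prop := out = numStepsUnordered_alt points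
instance (points : List (Int × Int)) (out : Int) : Decidable (Spec_numStepsUnordered points out) := by unfold Spec_numStepsUnordered; infer_instance

-- ===== CLAIM (what is proved, stated in full; the proofs are below) =====
def Claim_equal_numStepsUnordered : Prop := ∀ (points : List (Int × Int)), Dom_numStepsUnordered points → Pre_numStepsUnordered points → Spec_numStepsUnordered points (numStepsUnordered points)

-- ===== LEMMAS AND PROOFS =====

-- the running minimum never increases
theorem pvFoldMin_le (start : Int × Int) (l : List (Int × (Int × Int))) (m : Int) :
    l.foldl (fun c iq => min c (pvDist start iq.2)) m ≤ m := by
  induction l generalizing m with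
  | nil => simp
  | cons iq t ih =>
    simpa using le_trans (ih (min m (pvDist start iq.2))) (min_le_left _ _)

-- characterization of A's running-minimum/tie loop from a live state (acc, some m)
theorem pvFoldA_char (start : Int × Int) (l : List (Int × (Int × Int))) (acc : List Int) (m : Int) :
    l.foldl (pvAStep start) (acc, some m) =
      ((if l.foldl (fun c iq => min c (pvDist start iq.2)) m = m then acc else []) ++
        (l.filter (fun iq =>
          decide (pvDist start iq.2 = l.foldl (fun c iq => min c (pvDist start iq.2)) m))).map
          (fun iq => iq.1),
       some (l.foldl (fun c iq => min c (pvDist start iq.2)) m)) := by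
  induction l generalizing acc m with
  | nil => simp
  | cons iq t ih =>
    rcases lt_trichotomy (pvDist start iq.2) m with h | h | h
    · have hstep : pvAStep start (acc, some m) iq = ([iq.1], some (pvDist start iq.2)) := by
        simp [pvAStep, h]
      have hmin : min m (pvDist start iq.2) = pvDist start iq.2 := min_eq_right h.le
      simp only [List.foldl_cons, hstep, hmin]
      rw [ih]
      simp only [List.filter_cons, decide_eq_true_eq]
      have hne : ¬ t.foldl (fun c iq => min c (pvDist start iq.2)) (pvDist start iq.2) = m := by
        have := pvFoldMin_le start t (pvDist start iq.2); omega
      rw [if_neg hne]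
      by_cases hq : pvDist start iq.2 =
          t.foldl (fun c iq => min c (pvDist start iq.2)) (pvDist start iq.2)
      · rw [if_pos hq.symm, if_pos hq]; simp
      · rw [if_neg (fun hh => hq hh.symm), if_neg hq]
    · subst h
      have hstep : pvAStep start (acc, some (pvDist start iq.2)) iq =
          (acc ++ [iq.1], some (pvDist start iq.2)) := by
        simp [pvAStep]
      simp only [List.foldl_cons, hstep, min_self]
      rw [ih]
      simp only [List.filter_cons, decide_eq_true_eq]
      by_cases hMs : t.foldl (fun c iq => min c (pvDist start iq.2)) (pvDist start iq.2) =
          pvDist start iq.2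
      · rw [if_pos hMs, if_pos hMs, if_pos hMs.symm]; simp
      · rw [if_neg hMs, if_neg hMs, if_neg (fun hh => hMs hh.symm)]
    · have hle : ¬ pvDist start iq.2 < m := not_lt.mpr h.le
      have hne : ¬ pvDist start iq.2 = m := by omega
      have hstep : pvAStep start (acc, some m) iq = (acc, some m) := by
        simp [pvAStep, hle, hne]
      have hmin : min m (pvDist start iq.2) = m := min_eq_left h.le
      simp only [List.foldl_cons, hstep, hmin]
      rw [ih]
      simp only [List.filter_cons, decide_eq_true_eq]
      have hq : ¬ pvDist start iq.2 = t.foldl (fun c iq => min c (pvDist start iq.2)) m := by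
        have := pvFoldMin_le start t m; omega
      rw [if_neg hq]

-- a fold over enumerate that only reads the point equals the fold over the list
theorem pvFoldEnum (start : Int × Int) (l : List (Int × Int)) : ∀ (s : Int) (c : Int),
    (PySem.List.enumerate l s).foldl (fun c iq => min c (pvDist start iq.2)) c =
      l.foldl (fun c q => min c (pvDist start q)) c := by
  induction l with
  | nil => intro s c; rfl
  | cons x t ih =>
    intro s c
    rw [PySem.List.enumerate_cons]
    simp only [List.foldl_cons]
    exact ih _ _

-- min of a shifted nonempty list
theorem pvMinShift (c : Int) (v : Int) (t : List Int) :
    (t.map (fun w => c + w)).foldl min (c + v) = c + t.foldl min v := by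
  induction t generalizing v with
  | nil => rfl
  | cons w t ih => simpa [min_add_add_left] using ih (min v w)

-- indexing facts for a member of enumerate xs 0
theorem pvEnumGet (xs : List (Int × Int)) (iq : Int × (Int × Int))
    (h : iq ∈ PySem.List.enumerate xs 0) :
    PySem.List.pyGetD xs iq.1 (0, 0) = iq.2 ∧ 0 ≤ iq.1 ∧ iq.1 < (xs.length : Int) := by
  rcases (PySem.List.mem_enumerate_iff _ _ _).1 h with ⟨k, hk, hp⟩
  subst hp
  refine ⟨?_, by simp, ?_⟩
  · simp [PySem.List.pyGetD_natCast, List.getD_eq_getElem?_getD, List.getElem?_eq_getElem hk]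
  · simpa using (Nat.cast_lt.mpr hk : (k : Int) < (xs.length : Int))

theorem pvRemove_length (xs : List (Int × Int)) (j : Int) (h0 : 0 ≤ j)
    (h1 : j < (xs.length : Int)) : (pvRemove xs j).length = xs.length - 1 := by
  unfold pvRemove
  rw [PySem.List.slice_to xs h0, PySem.List.slice_from xs (by omega : (0 : Int) ≤ j + 1)]
  simp only [List.length_append, List.length_take, List.length_drop]
  omega

-- the accumulator lemma: A's threaded total equals total plus B's bottom-up cost
theorem pvMain : ∀ (fuel : Nat) (rem : List (Int × Int)), rem.length ≤ fuel →
    ∀ (start : Int × Int) (total : Int),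
    pvRNumA fuel start rem total = total + pvCostB fuel start rem := by
  intro fuel
  induction fuel with
  | zero => intro rem _ start total; simp [pvRNumA, pvCostB]
  | succ f ih =>
    intro rem hlen start total
    match rem with
    | [] => simp [pvRNumA, pvCostB]
    | x :: xs =>
      have hlen' : xs.length ≤ f := by simpa using hlen
      rw [pvRNumA, pvCostB, if_neg (List.cons_ne_nil x xs), if_neg (List.cons_ne_nil x xs)]
      dsimp only
      set M := xs.foldl (fun c q => min c (pvDist start q)) (pvDist start x) with hMdef
      have hmM : PySem.List.min? ((x :: xs).map (pvDist start)) (fun v => v) = some M := by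
        rw [List.map_cons, PySem.List.min?_id_cons, List.foldl_map, hMdef]
      have hfold : (PySem.List.enumerate (x :: xs)).foldl (pvAStep start) ([], none) =
          (((PySem.List.enumerate (x :: xs)).filter
              (fun iq => decide (pvDist start iq.2 = M))).map (fun iq => iq.1), some M) := by
        rw [PySem.List.enumerate_cons]
        rw [List.foldl_cons]
        have h1 : pvAStep start ([], none) ((0 : Int), x) = ([0], some (pvDist start x)) := rfl
        rw [h1, pvFoldA_char]
        have hMe : (PySem.List.enumerate xs (0 + 1)).foldl
            (fun c iq => min c (pvDist start iq.2)) (pvDist start x) = M := by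
          rw [pvFoldEnum, hMdef]
        rw [hMe, List.filter_cons]
        simp only [decide_eq_true_eq]
        by_cases hx : pvDist start x = M
        · rw [if_pos hx.symm, if_pos hx]; simp
        · rw [if_neg (fun hh => hx hh.symm), if_neg hx]; simp
      have hd : (PySem.List.min? (List.map (pvDist start) (x :: xs)) (fun v => v)).getD 0 = M := by
        rw [hmM]; rfl
      rw [hfold, hd]
      dsimp only
      simp only [Option.getD_some]
      set ties := (PySem.List.enumerate (x :: xs)).filter
          (fun iq => decide (pvDist start iq.2 = M)) with hties
      have hbranches : (ties.map (fun iq => iq.1)).map (fun i =>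
            pvRNumA f (PySem.List.pyGetD (x :: xs) i (0, 0)) (pvRemove (x :: xs) i)
              (total + M)) =
          (ties.map (fun iq => pvCostB f iq.2 (pvRemove (x :: xs) iq.1))).map
            (fun w => total + M + w) := by
        rw [List.map_map, List.map_map]
        refine List.map_congr_left ?_
        intro iq hiq
        simp only [Function.comp_apply]
        obtain ⟨hget, h0, h1⟩ := pvEnumGet _ _ (List.mem_of_mem_filter hiq)
        rw [hget]
        have hrl : (pvRemove (x :: xs) iq.1).length ≤ f := by
          rw [pvRemove_length _ _ h0 h1]; simpa using hlen
        rw [ih _ hrl]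
      have hne : ties ≠ [] := by
        have hmem : M ∈ (x :: xs).map (pvDist start) := PySem.List.min?_mem hmM
        rcases List.mem_map.1 hmem with ⟨q, hq, hdq⟩
        rcases List.mem_iff_getElem.1 hq with ⟨k, hk, rfl⟩
        have hkmem : ((0 : Int) + (k : Int), (x :: xs)[k]) ∈ PySem.List.enumerate (x :: xs) 0 :=
          (PySem.List.mem_enumerate_iff _ _ _).2 ⟨k, hk, rfl⟩
        exact List.ne_nil_of_mem (List.mem_filter.2 ⟨hkmem, by simpa using hdq⟩)
      rcases List.exists_cons_of_ne_nil hne with ⟨b, bs, hcons⟩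
      rw [hbranches, hcons]
      simp only [List.map_cons, PySem.List.min?_id_cons, Option.getD_some]
      rw [pvMinShift]
      ring

-- ===== VERDICT (by name: the statement is the Claim_ definition above) =====
theorem numStepsUnordered_spec : Claim_equal_numStepsUnordered := by
  intro points _ hpre
  unfold Spec_numStepsUnordered numStepsUnordered numStepsUnordered_alt
  rw [PySem.List.enumerate_eq_map_pyRange points ((0, 0) : Int × Int), List.map_map]
  refine congrArg (fun L => (PySem.List.min? L (fun v => v)).getD 0) (List.map_congr_left ?_)
  intro j hj
  rcases (PySem.List.mem_pyRange_one).1 hj with ⟨h0, h1⟩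
  have h1' : j < (points.length : Int) := by simpa using h1
  have hrl : (pvRemove points j).length ≤ points.length := by
    rw [pvRemove_length _ _ h0 h1']; omega
  simp only [Function.comp_apply]
  rw [pvMain points.length (pvRemove points j) hrl (PySem.List.pyGetD points j (0, 0)) 0,
    zero_add]
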